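-- pv_equiv track=rewrite | github.com/Torito9609/particiones-conjuntos | tests/test_rgs_basic.py | is_valid_partition
-- ===== SOURCE A (Python) =====
-- from typing import List
--
-- def is_valid_partition(blocks: List[List[int]], n: int) -> bool:
--     """Bloques no vacíos, disjuntos, cubren {1..n}."""
--     flat = [x for b in blocks for x in b]
--     return (
--         all(len(b) >= 1 for b in blocks)
--         and len(flat) == n
--         and set(flat) == set(range(1, n + 1))
--         and sum(len(b) for b in blocks) == len(set(flat))
--     )
-- ===== SOURCE B (Python) =====
-- from typing import List
--
-- def is_valid_partition(blocks: List[List[int]], n: int) -> bool: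
--     """Single validating pass: early-exit on empty block, out-of-range or duplicate element."""
--     seen = set()
--     for b in blocks:
--         if not b:
--             return False
--         for x in b:
--             if x < 1 or x > n or x in seen:
--                 return False
--             seen.add(x)
--     return len(seen) == n
-- ===== Notes on version B (the rewrite author's own statement) =====
-- stated objective: simpler
-- what changed: Replaces A's flatten-then-four-global-checks (two set constructions plus a range set and length sums) with one early-exiting traversal that maintains a running seen-set and ends with a single size comparison.
import Mathlib
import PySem

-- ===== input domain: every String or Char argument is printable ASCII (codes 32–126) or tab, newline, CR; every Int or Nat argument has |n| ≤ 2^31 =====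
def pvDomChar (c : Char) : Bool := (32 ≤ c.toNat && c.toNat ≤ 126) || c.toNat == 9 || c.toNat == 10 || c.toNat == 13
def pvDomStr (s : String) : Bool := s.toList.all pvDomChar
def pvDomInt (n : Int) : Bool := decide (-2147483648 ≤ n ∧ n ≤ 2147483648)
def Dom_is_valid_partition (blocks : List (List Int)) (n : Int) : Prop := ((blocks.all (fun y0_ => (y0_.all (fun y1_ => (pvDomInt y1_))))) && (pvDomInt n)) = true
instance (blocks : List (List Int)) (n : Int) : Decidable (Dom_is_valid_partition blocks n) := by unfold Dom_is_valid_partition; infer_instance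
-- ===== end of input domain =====

-- B replaces A's flatten-plus-four-global-checks with one early-exiting pass over a running seen-set (objective: simpler).

-- ===== PORT A =====
def is_valid_partition (blocks : List (List Int)) (n : Int) : Bool :=
  -- flat = [x for b in blocks for x in b]
  let flat : List Int := blocks.flatMap (fun b => b)
  -- all(len(b) >= 1 for b in blocks)
  (blocks.all (fun b => decide ((1 : Int) ≤ (b.length : Int))))
  -- and len(flat) == n
  && (decide ((flat.length : Int) = n))
  -- and set(flat) == set(range(1, n + 1))
  && (PySem.Set.equal (PySem.Set.ofList flat) (PySem.Set.ofList (PySem.List.pyRange 1 (n + 1) 1)))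
  -- and sum(len(b) for b in blocks) == len(set(flat))
  && (decide ((blocks.map (fun b => (b.length : Int))).sum = ((PySem.Set.ofList flat).length : Int)))

-- ===== PORT B =====
-- inner loop: 'for x in b: if x < 1 or x > n or x in seen: return False; seen.add(x)'
def pvAltInner (n : Int) : List Int → PySem.Set Int → Option (PySem.Set Int)
  | [], seen => some seen
  | x :: xs, seen =>
      if x < 1 ∨ n < x ∨ PySem.Set.contains seen x then none
      else pvAltInner n xs (PySem.Set.add seen x)

-- outer loop: 'for b in blocks: if not b: return False; …' then 'return len(seen) == n'
def pvAltGo (n : Int) : List (List Int) → PySem.Set Int → Bool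
  | [], seen => decide ((seen.length : Int) = n)
  | b :: bs, seen =>
      if b.isEmpty then false
      else match pvAltInner n b seen with
           | none => false
           | some seen' => pvAltGo n bs seen'

def is_valid_partition_alt (blocks : List (List Int)) (n : Int) : Bool :=
  pvAltGo n blocks PySem.Set.empty

-- ===== PRECONDITION & SPEC =====
def Spec_is_valid_partition (blocks : List (List Int)) (n : Int) (out : Bool) : Prop := out = is_valid_partition_alt blocks n
instance (blocks : List (List Int)) (n : Int) (out : Bool) : Decidable (Spec_is_valid_partition blocks n out) := by unfold Spec_is_valid_partition; infer_instance

-- ===== CLAIM (what is proved, stated in full; the proofs are below) =====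
def Claim_equal_is_valid_partition : Prop := ∀ (blocks : List (List Int)) (n : Int), Dom_is_valid_partition blocks n → Spec_is_valid_partition blocks n (is_valid_partition blocks n)

-- ===== LEMMAS AND PROOFS =====

-- set(xs) has the same length as xs exactly when xs has no duplicates
lemma ofList_length_eq_iff_nodup (xs : List Int) :
    (PySem.Set.ofList xs).length = xs.length ↔ xs.Nodup := by
  constructor
  · intro h
    have hsub : PySem.Set.ofList xs ⊆ xs := fun y hy => (PySem.Set.mem_ofList _ _).1 hy
    have hsp : List.Subperm (PySem.Set.ofList xs) xs :=
      List.subperm_of_subset (PySem.Set.nodup_ofList xs) hsub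
    have hperm : List.Perm (PySem.Set.ofList xs) xs := hsp.perm_of_length_le (le_of_eq h.symm)
    exact hperm.nodup_iff.1 (PySem.Set.nodup_ofList xs)
  · intro h
    rw [PySem.Set.ofList_eq_self_of_nodup xs h]

-- characterisation of port A
lemma portA_iff (blocks : List (List Int)) (n : Int) :
    is_valid_partition blocks n = true ↔
      ((∀ b ∈ blocks, b ≠ []) ∧
       (∀ x ∈ blocks.flatMap (fun b => b), 1 ≤ x ∧ x ≤ n) ∧
       (blocks.flatMap (fun b => b)).Nodup ∧
       ((blocks.flatMap (fun b => b)).length : Int) = n) := by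
  have hsum : (blocks.map (fun b => (b.length : Int))).sum
      = ((blocks.flatMap (fun b => b)).length : Int) := by
    induction blocks with
    | nil => simp
    | cons b bs ih =>
      simp only [List.map_cons, List.sum_cons, List.flatMap_cons, List.length_append, ih]
      push_cast; ring
  constructor
  · intro h
    simp only [is_valid_partition, Bool.and_eq_true, List.all_eq_true, decide_eq_true_eq] at h
    obtain ⟨⟨⟨h1, h2⟩, h3⟩, h4⟩ := h
    have hnodup : (blocks.flatMap (fun b => b)).Nodup := by
      rw [← ofList_length_eq_iff_nodup]
      rw [hsum] at h4
      omega
    refine ⟨fun b hb => ?_, fun x hx => ?_, hnodup, h2⟩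
    · intro hnil
      have := h1 b hb
      rw [hnil] at this
      simp at this
    · have hm : x ∈ PySem.Set.ofList (blocks.flatMap (fun b => b)) :=
        (PySem.Set.mem_ofList _ _).2 hx
      have := (PySem.Set.equal_iff _ _).1 h3 x |>.1 hm
      have := (PySem.Set.mem_ofList _ _).1 this
      have := (PySem.List.mem_pyRange_one).1 this
      omega
  · rintro ⟨h1, h2, h3, h4⟩
    simp only [is_valid_partition, Bool.and_eq_true, List.all_eq_true, decide_eq_true_eq]
    have hn0 : 0 ≤ n := by omega
    have hrlen : (PySem.List.pyRange 1 (n + 1) 1).length = n.toNat := by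
      rw [PySem.List.length_pyRange_one]; omega
    have hsub : blocks.flatMap (fun b => b) ⊆ PySem.List.pyRange 1 (n + 1) 1 := by
      intro x hx
      rw [PySem.List.mem_pyRange_one]
      have := h2 x hx; omega
    have hsp : List.Subperm (blocks.flatMap (fun b => b)) (PySem.List.pyRange 1 (n + 1) 1) :=
      List.subperm_of_subset h3 hsub
    have hlen : (PySem.List.pyRange 1 (n + 1) 1).length ≤ (blocks.flatMap (fun b => b)).length := by
      omega
    have hperm : List.Perm (blocks.flatMap (fun b => b)) (PySem.List.pyRange 1 (n + 1) 1) :=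
      hsp.perm_of_length_le hlen
    refine ⟨⟨⟨fun b hb => ?_, h4⟩, ?_⟩, ?_⟩
    · have hbne := h1 b hb
      have : 0 < b.length := List.length_pos_iff.2 hbne
      omega
    · rw [PySem.Set.equal_iff]
      intro x
      rw [PySem.Set.mem_ofList, PySem.Set.mem_ofList]
      exact hperm.mem_iff
    · rw [hsum, PySem.Set.ofList_eq_self_of_nodup _ h3]

-- characterisation of the inner pass
lemma pvAltInner_eq (n : Int) (xs : List Int) : ∀ (seen : PySem.Set Int),
    pvAltInner n xs seen =
      if (∀ x ∈ xs, 1 ≤ x ∧ x ≤ n) ∧ xs.Nodup ∧ (∀ x ∈ xs, x ∉ seen)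
      then some (seen ++ xs) else none := by
  induction xs with
  | nil => intro seen; simp [pvAltInner]
  | cons x xs ih =>
    intro seen
    rw [pvAltInner]
    by_cases hfail : x < 1 ∨ n < x ∨ PySem.Set.contains seen x
    · rw [if_pos hfail]
      have : ¬ ((∀ y ∈ x :: xs, 1 ≤ y ∧ y ≤ n) ∧ (x :: xs).Nodup ∧ (∀ y ∈ x :: xs, y ∉ seen)) := by
        rintro ⟨ha, _, hc⟩
        have h1 := ha x (by simp)
        have h2 := hc x (by simp)
        rcases hfail with h | h | h
        · omega
        · omega
        · exact h2 ((PySem.Set.contains_iff _ _).1 h)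
      rw [if_neg this]
    · rw [if_neg hfail]
      push Not at hfail
      obtain ⟨hx1, hx2, hx3⟩ := hfail
      have hxs : x ∉ seen := by simpa using hx3
      rw [PySem.Set.add_of_not_mem hxs, ih]
      by_cases hc : (∀ y ∈ x :: xs, 1 ≤ y ∧ y ≤ n) ∧ (x :: xs).Nodup ∧ (∀ y ∈ x :: xs, y ∉ seen)
      · obtain ⟨ha, hb, hcc⟩ := hc
        have : (∀ y ∈ xs, 1 ≤ y ∧ y ≤ n) ∧ xs.Nodup ∧ (∀ y ∈ xs, y ∉ seen ++ [x]) := by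
          refine ⟨fun y hy => ha y (by simp [hy]), (List.nodup_cons.1 hb).2, fun y hy => ?_⟩
          simp only [List.mem_append, List.mem_singleton]
          rintro (h | h)
          · exact hcc y (by simp [hy]) h
          · exact (List.nodup_cons.1 hb).1 (h ▸ hy)
        rw [if_pos this, if_pos ⟨ha, hb, hcc⟩]
        simp
      · have : ¬ ((∀ y ∈ xs, 1 ≤ y ∧ y ≤ n) ∧ xs.Nodup ∧ (∀ y ∈ xs, y ∉ seen ++ [x])) := by
          rintro ⟨ha, hb, hcc⟩
          apply hc
          refine ⟨?_, ?_, ?_⟩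
          · intro y hy
            rcases List.mem_cons.1 hy with rfl | hy
            · exact ⟨by omega, hx2⟩
            · exact ha y hy
          · rw [List.nodup_cons]
            exact ⟨fun hm => (hcc x hm) (by simp), hb⟩
          · intro y hy
            rcases List.mem_cons.1 hy with rfl | hy
            · exact hxs
            · intro hm; exact hcc y hy (by simp [hm])
        rw [if_neg this, if_neg hc]

-- characterisation of the outer pass
lemma pvAltGo_iff (n : Int) (bs : List (List Int)) : ∀ (seen : PySem.Set Int),
    pvAltGo n bs seen = true ↔
      ((∀ b ∈ bs, b ≠ []) ∧
       (∀ x ∈ bs.flatMap (fun b => b), 1 ≤ x ∧ x ≤ n) ∧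
       (bs.flatMap (fun b => b)).Nodup ∧
       (∀ x ∈ bs.flatMap (fun b => b), x ∉ seen) ∧
       ((seen.length : Int) + ((bs.flatMap (fun b => b)).length : Int) = n)) := by
  induction bs with
  | nil =>
    intro seen
    simp [pvAltGo]
  | cons b bs ih =>
    intro seen
    rw [pvAltGo]
    by_cases hb : b.isEmpty
    · rw [if_pos hb]
      have hbe : b = [] := List.isEmpty_iff.1 hb
      simp [hbe]
    · rw [if_neg hb]
      have hbne : b ≠ [] := fun h => hb (by simp [h])
      rw [pvAltInner_eq]
      by_cases hc : (∀ x ∈ b, 1 ≤ x ∧ x ≤ n) ∧ b.Nodup ∧ (∀ x ∈ b, x ∉ seen)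
      · rw [if_pos hc]
        obtain ⟨h1, h2, h3⟩ := hc
        show pvAltGo n bs (seen ++ b) = true ↔ _
        rw [ih (seen ++ b)]
        constructor
        · rintro ⟨ha, hrange, hnd, hsn, hlen⟩
          refine ⟨?_, ?_, ?_, ?_, ?_⟩
          · intro b' hb'
            rcases List.mem_cons.1 hb' with rfl | hb'
            · exact hbne
            · exact ha b' hb'
          · intro x hx
            rw [List.flatMap_cons, List.mem_append] at hx
            rcases hx with hx | hx
            · exact h1 x hx
            · exact hrange x hx
          · rw [List.flatMap_cons, List.nodup_append]
            refine ⟨h2, hnd, ?_⟩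
            intro a ha' c hc' heq
            exact hsn c hc' (by rw [← heq]; exact List.mem_append_right _ ha')
          · intro x hx hxseen
            rw [List.flatMap_cons, List.mem_append] at hx
            rcases hx with hx | hx
            · exact h3 x hx hxseen
            · exact hsn x hx (List.mem_append_left _ hxseen)
          · rw [List.flatMap_cons]
            rw [List.length_append] at hlen
            rw [List.length_append]
            push_cast at hlen ⊢
            omega
        · rintro ⟨ha, hrange, hnd, hsn, hlen⟩
          rw [List.flatMap_cons] at hrange hnd hsn hlen
          rw [List.nodup_append] at hnd
          refine ⟨fun b' hb' => ha b' (List.mem_cons_of_mem _ hb'), ?_, hnd.2.1, ?_, ?_⟩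
          · intro x hx
            exact hrange x (List.mem_append_right _ hx)
          · intro x hx hxsb
            rw [List.mem_append] at hxsb
            rcases hxsb with h | h
            · exact hsn x (List.mem_append_right _ hx) h
            · exact absurd rfl (hnd.2.2 x h x hx)
          · rw [List.length_append] at hlen ⊢
            push_cast at hlen ⊢
            omega
      · rw [if_neg hc]
        simp only [Bool.false_eq_true, false_iff]
        rintro ⟨ha, hrange, hnd, hsn, hlen⟩
        rw [List.flatMap_cons] at hrange hnd hsn
        rw [List.nodup_append] at hnd
        exact hc ⟨fun x hx => hrange x (List.mem_append_left _ hx), hnd.1,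
          fun x hx => hsn x (List.mem_append_left _ hx)⟩

-- characterisation of port B
lemma portB_iff (blocks : List (List Int)) (n : Int) :
    is_valid_partition_alt blocks n = true ↔
      ((∀ b ∈ blocks, b ≠ []) ∧
       (∀ x ∈ blocks.flatMap (fun b => b), 1 ≤ x ∧ x ≤ n) ∧
       (blocks.flatMap (fun b => b)).Nodup ∧
       ((blocks.flatMap (fun b => b)).length : Int) = n) := by
  rw [is_valid_partition_alt, pvAltGo_iff]
  simp [PySem.Set.empty]

-- ===== VERDICT (by name: the statement is the Claim_ definition above) =====
theorem is_valid_partition_spec : Claim_equal_is_valid_partition := by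
  intro blocks n _
  unfold Spec_is_valid_partition
  rcases h : is_valid_partition_alt blocks n with _ | _
  · rcases h' : is_valid_partition blocks n with _ | _
    · rfl
    · exfalso
      have := (portA_iff blocks n).1 h'
      have := (portB_iff blocks n).2 this
      rw [h] at this; exact Bool.false_ne_true this
  · exact (portA_iff blocks n).2 ((portB_iff blocks n).1 h)
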